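-- pv_equiv track=rewrite | github.com/Siloq-app/siloq-api | seo/modifier_classifier.py | get_primary_modifier_category
-- ===== SOURCE A (Python) =====
-- from typing import List, Dict, Any, Optional, Set, Tuple
--
-- def get_primary_modifier_category(modifiers: List[Dict]) -> str:
--     """
--     Get the primary (highest-priority) modifier category.
--     Priority: location > service_type > audience > material > brand_entity > temporal > intent_qualifier
--     """
--     if not modifiers:
--         return 'none'
--
--     priority = ['location', 'service_type', 'audience', 'material',
--                 'brand_entity', 'temporal', 'intent_qualifier']
--
--     for cat in priority:
--         if any(m['category'] == cat for m in modifiers):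
--             return cat
--
--     return 'unknown'
-- ===== SOURCE B (Python) =====
-- def get_primary_modifier_category(modifiers):
--     """One pass over modifiers, tracking the minimum priority rank via a rank table."""
--     if not modifiers:
--         return 'none'
--
--     priority = ['location', 'service_type', 'audience', 'material',
--                 'brand_entity', 'temporal', 'intent_qualifier']
--     rank = {cat: i for i, cat in enumerate(priority)}
--     n = len(priority)
--
--     best = n
--     for m in modifiers:
--         r = rank.get(m['category'], n)
--         if r < best:
--             best = r
--             if best == 0:
--                 break  # 'location' cannot be outranked
--
--     return priority[best] if best < n else 'unknown'
-- ===== Notes on version B (the rewrite author's own statement) =====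
-- stated objective: alternative
-- what changed: A scans the priority list and re-scans all modifiers for each category (7 passes); B builds a category->rank dict once and makes a single pass over the modifiers keeping the minimum rank (with an early break on rank 0), then maps the rank back to a name.
-- outside the precondition, e.g. on get_primary_modifier_category([{'category': 'location'}, {}]): A returns 'location', B returns 'location'
import Mathlib
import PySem

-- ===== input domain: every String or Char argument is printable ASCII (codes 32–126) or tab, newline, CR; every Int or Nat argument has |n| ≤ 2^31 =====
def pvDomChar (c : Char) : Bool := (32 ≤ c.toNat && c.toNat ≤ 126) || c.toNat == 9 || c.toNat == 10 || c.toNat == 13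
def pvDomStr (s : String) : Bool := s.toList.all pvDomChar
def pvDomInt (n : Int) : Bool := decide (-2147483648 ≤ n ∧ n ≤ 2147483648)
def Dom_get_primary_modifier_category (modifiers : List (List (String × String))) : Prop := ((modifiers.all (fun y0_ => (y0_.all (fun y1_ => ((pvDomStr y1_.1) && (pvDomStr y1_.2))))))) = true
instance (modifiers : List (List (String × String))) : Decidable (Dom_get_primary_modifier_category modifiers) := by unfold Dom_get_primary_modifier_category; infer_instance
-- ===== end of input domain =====

-- B replaces A's 7 category-wise scans of the modifiers with one rank-table pass keeping the minimum rank (objective: alternative).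

-- ===== PORT A =====
def pvPriorityA : List String :=
  ["location", "service_type", "audience", "material",
   "brand_entity", "temporal", "intent_qualifier"]

-- A's 'for cat in priority: if any(...): return cat' loop
def pvScanA (modifiers : List (List (String × String))) : List String → String
  | [] => "unknown"
  | cat :: rest =>
      if modifiers.any (fun m => (PySem.Dict.mk m).get? "category" == some cat) then cat
      else pvScanA modifiers rest

def get_primary_modifier_category (modifiers : List (List (String × String))) : String :=
  if modifiers = [] then "none"
  else pvScanA modifiers pvPriorityA

-- ===== PORT B =====
def pvPriorityB : List String :=
  ["location", "service_type", "audience", "material",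
   "brand_entity", "temporal", "intent_qualifier"]

-- rank = {cat: i for i, cat in enumerate(priority)}
def pvRankB : PySem.Dict String Int :=
  (PySem.List.enumerate pvPriorityB 0).foldl (fun d p => d.insert p.2 p.1) PySem.Dict.empty

-- B's single pass: minimum rank seen so far, breaking when rank 0 is reached
def pvLoopB (best : Int) : List (List (String × String)) → Int
  | [] => best
  | m :: rest =>
      let r := PySem.Dict.getD pvRankB ((PySem.Dict.mk m).getD "category" "") (pvPriorityB.length : Int)
      if r < best then (if r = 0 then r else pvLoopB r rest)
      else pvLoopB best rest

def get_primary_modifier_category_alt (modifiers : List (List (String × String))) : String :=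
  if modifiers = [] then "none"
  else
    let n : Int := (pvPriorityB.length : Int)
    let best := pvLoopB n modifiers
    if best < n then PySem.List.pyGetD pvPriorityB best "" else "unknown"

-- ===== PRECONDITION & SPEC =====
-- Pre_ excludes lists in which some modifier lacks a 'category' key: on those A (and B) raises
-- KeyError, except when an earlier 'location' modifier short-circuits the scan before the
-- malformed dict is read — an accident of scan order on malformed input.
def Pre_get_primary_modifier_category (modifiers : List (List (String × String))) : Prop :=
  ∀ m ∈ modifiers, ((PySem.Dict.mk m).get? "category").isSome = true
instance (modifiers : List (List (String × String))) : Decidable (Pre_get_primary_modifier_category modifiers) := by unfold Pre_get_primary_modifier_category; infer_instance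

def pvWitness_get_primary_modifier_category : (List (List (String × String))) :=
  [[("category", "service_type"), ("value", "emergency")], [("category", "audience")]]

def Spec_get_primary_modifier_category (modifiers : List (List (String × String))) (out : String) : Prop := out = get_primary_modifier_category_alt modifiers
instance (modifiers : List (List (String × String))) (out : String) : Decidable (Spec_get_primary_modifier_category modifiers out) := by unfold Spec_get_primary_modifier_category; infer_instance

-- ===== CLAIM (what is proved, stated in full; the proofs are below) =====
def Claim_equal_get_primary_modifier_category : Prop := ∀ (modifiers : List (List (String × String))), Dom_get_primary_modifier_category modifiers → Pre_get_primary_modifier_category modifiers → Spec_get_primary_modifier_category modifiers (get_primary_modifier_category modifiers)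

-- ===== LEMMAS AND PROOFS =====

-- helper abbreviations for the proofs
def pvCat (m : List (String × String)) : String := ((PySem.Dict.mk m).get? "category").getD ""
def pvRk (c : String) : Int := PySem.Dict.getD pvRankB c 7
def pvStep (a : Int) (m : List (String × String)) : Int := min a (pvRk (pvCat m))
def pvMin (mods : List (List (String × String))) : Int := mods.foldl pvStep 7

lemma pvRk_cases (c : String) : pvRk c =
    if "location" = c then 0 else if "service_type" = c then 1 else if "audience" = c then 2
    else if "material" = c then 3 else if "brand_entity" = c then 4 else if "temporal" = c then 5
    else if "intent_qualifier" = c then 6 else 7 := by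
  have h : pvRankB = PySem.Dict.mk [("location", 0), ("service_type", 1), ("audience", 2),
      ("material", 3), ("brand_entity", 4), ("temporal", 5), ("intent_qualifier", 6)] := by rfl
  rw [pvRk, h]
  simp only [PySem.Dict.getD, PySem.Dict.get?_mk_cons, beq_iff_eq]
  split_ifs <;> rfl

lemma pvRk_nonneg (c : String) : 0 ≤ pvRk c := by
  rw [pvRk_cases]; split_ifs <;> norm_num

lemma foldl_step_zero (mods : List (List (String × String))) :
    mods.foldl pvStep 0 = 0 := by
  induction mods with
  | nil => rfl
  | cons m rest ih =>
      have h1 := pvRk_nonneg (pvCat m)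
      simp only [List.foldl]
      have h0 : pvStep 0 m = 0 := by simp only [pvStep]; omega
      rw [h0, ih]

lemma pvLoopB_eq (mods : List (List (String × String))) :
    ∀ b : Int, 0 ≤ b → pvLoopB b mods = mods.foldl pvStep b := by
  induction mods with
  | nil => intro b _; rfl
  | cons m rest ih =>
      intro b hb
      show (if pvRk (pvCat m) < b then
              (if pvRk (pvCat m) = 0 then pvRk (pvCat m) else pvLoopB (pvRk (pvCat m)) rest)
            else pvLoopB b rest) = (m :: rest).foldl pvStep b
      simp only [List.foldl]
      by_cases hr : pvRk (pvCat m) < b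
      · rw [if_pos hr]
        by_cases h0 : pvRk (pvCat m) = 0
        · rw [if_pos h0]
          have hs : pvStep b m = 0 := by simp only [pvStep, h0]; omega
          rw [hs, foldl_step_zero, h0]
        · rw [if_neg h0, ih _ (pvRk_nonneg _)]
          have hs : pvStep b m = pvRk (pvCat m) := by simp only [pvStep]; omega
          rw [hs]
      · rw [if_neg hr, ih _ hb]
        have hs : pvStep b m = b := by simp only [pvStep]; omega
        rw [hs]

lemma foldl_step_le_init (mods : List (List (String × String))) :
    ∀ b : Int, mods.foldl pvStep b ≤ b := by
  induction mods with
  | nil => intro b; exact le_refl b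
  | cons m rest ih =>
      intro b
      calc (m :: rest).foldl pvStep b = rest.foldl pvStep (pvStep b m) := rfl
        _ ≤ pvStep b m := ih _
        _ ≤ b := min_le_left _ _

lemma foldl_step_nonneg (mods : List (List (String × String))) :
    ∀ b : Int, 0 ≤ b → 0 ≤ mods.foldl pvStep b := by
  induction mods with
  | nil => intro b hb; exact hb
  | cons m rest ih =>
      intro b hb
      exact ih _ (le_min hb (pvRk_nonneg _))

lemma foldl_step_le_mem (mods : List (List (String × String))) :
    ∀ b : Int, ∀ m ∈ mods, mods.foldl pvStep b ≤ pvRk (pvCat m) := by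
  induction mods with
  | nil => intro b m hm; cases hm
  | cons m0 rest ih =>
      intro b m hm
      rcases List.mem_cons.mp hm with h | h
      · subst h
        calc (m :: rest).foldl pvStep b = rest.foldl pvStep (pvStep b m) := rfl
          _ ≤ pvStep b m := foldl_step_le_init _ _
          _ ≤ pvRk (pvCat m) := min_le_right _ _
      · exact ih _ m h

lemma foldl_step_attain (mods : List (List (String × String))) :
    ∀ b : Int, mods.foldl pvStep b = b ∨ ∃ m ∈ mods, pvRk (pvCat m) = mods.foldl pvStep b := by
  induction mods with
  | nil => intro b; exact Or.inl rfl
  | cons m0 rest ih =>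
      intro b
      rcases ih (pvStep b m0) with h | h
      · by_cases hc : pvStep b m0 = b
        · exact Or.inl (by simp only [List.foldl]; rw [h, hc])
        · refine Or.inr ⟨m0, List.mem_cons_self, ?_⟩
          simp only [List.foldl]
          rw [h]
          have h1 := min_le_left b (pvRk (pvCat m0))
          have h2 := min_le_right b (pvRk (pvCat m0))
          simp only [pvStep] at *
          omega
      · obtain ⟨m, hm, hr⟩ := h
        exact Or.inr ⟨m, List.mem_cons_of_mem _ hm, hr⟩

lemma get?_eq_some_cat (m : List (String × String))
    (h : ((PySem.Dict.mk m).get? "category").isSome = true) :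
    (PySem.Dict.mk m).get? "category" = some (pvCat m) := by
  cases ho : (PySem.Dict.mk m).get? "category" with
  | none => rw [ho] at h; simp at h
  | some c => simp [pvCat, ho]

lemma any_iff (mods : List (List (String × String)))
    (hpre : ∀ m ∈ mods, ((PySem.Dict.mk m).get? "category").isSome = true) (c : String) :
    (mods.any (fun m => (PySem.Dict.mk m).get? "category" == some c) = true) ↔
      ∃ m ∈ mods, pvCat m = c := by
  rw [List.any_eq_true]
  constructor
  · rintro ⟨m, hm, he⟩
    rw [get?_eq_some_cat m (hpre m hm)] at he
    exact ⟨m, hm, by simpa using he⟩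
  · rintro ⟨m, hm, he⟩
    exact ⟨m, hm, by rw [get?_eq_some_cat m (hpre m hm)]; simpa using he⟩

lemma pvMain (mods : List (List (String × String)))
    (hpre : ∀ m ∈ mods, ((PySem.Dict.mk m).get? "category").isSome = true) :
    pvScanA mods pvPriorityA =
      (if pvMin mods < 7 then PySem.List.pyGetD pvPriorityB (pvMin mods) "" else "unknown") := by
  have h0 : 0 ≤ pvMin mods := foldl_step_nonneg mods 7 (by norm_num)
  have h7 : pvMin mods ≤ 7 := foldl_step_le_init mods 7
  have hge : ∀ m ∈ mods, pvMin mods ≤ pvRk (pvCat m) := fun m hm => foldl_step_le_mem mods 7 m hm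
  have hex : pvMin mods ≠ 7 → ∃ m ∈ mods, pvRk (pvCat m) = pvMin mods := by
    intro hne7
    rcases foldl_step_attain mods 7 with h | h
    · exact absurd h hne7
    · exact h
  set k := pvMin mods with hk
  clear_value k
  interval_cases k
  · -- pvMin mods = 0: "location" present, nothing higher-priority present
    obtain ⟨m0, hm0, hr0⟩ := hex (by omega)
    have hc0 : pvCat m0 = "location" := by
      rw [pvRk_cases] at hr0
      split_ifs at hr0 <;> first | omega | (apply Eq.symm; assumption)
    have hA0 : (mods.any (fun m => (PySem.Dict.mk m).get? "category" == some "location")) = true :=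
      (any_iff mods hpre _).mpr ⟨m0, hm0, hc0⟩
    simp [pvScanA, pvPriorityA, hA0]
    all_goals decide
  · -- pvMin mods = 1: "service_type" present, nothing higher-priority present
    obtain ⟨m0, hm0, hr0⟩ := hex (by omega)
    have hc0 : pvCat m0 = "service_type" := by
      rw [pvRk_cases] at hr0
      split_ifs at hr0 <;> first | omega | (apply Eq.symm; assumption)
    have hA0 : (mods.any (fun m => (PySem.Dict.mk m).get? "category" == some "location")) = false := by
      rw [Bool.eq_false_iff, Ne, any_iff mods hpre]
      rintro ⟨m, hm, hc⟩
      have hgm := hge m hm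
      rw [pvRk_cases, hc] at hgm
      simp at hgm
    have hA1 : (mods.any (fun m => (PySem.Dict.mk m).get? "category" == some "service_type")) = true :=
      (any_iff mods hpre _).mpr ⟨m0, hm0, hc0⟩
    simp [pvScanA, pvPriorityA, hA0, hA1]
    all_goals decide
  · -- pvMin mods = 2: "audience" present, nothing higher-priority present
    obtain ⟨m0, hm0, hr0⟩ := hex (by omega)
    have hc0 : pvCat m0 = "audience" := by
      rw [pvRk_cases] at hr0
      split_ifs at hr0 <;> first | omega | (apply Eq.symm; assumption)
    have hA0 : (mods.any (fun m => (PySem.Dict.mk m).get? "category" == some "location")) = false := by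
      rw [Bool.eq_false_iff, Ne, any_iff mods hpre]
      rintro ⟨m, hm, hc⟩
      have hgm := hge m hm
      rw [pvRk_cases, hc] at hgm
      simp at hgm
    have hA1 : (mods.any (fun m => (PySem.Dict.mk m).get? "category" == some "service_type")) = false := by
      rw [Bool.eq_false_iff, Ne, any_iff mods hpre]
      rintro ⟨m, hm, hc⟩
      have hgm := hge m hm
      rw [pvRk_cases, hc] at hgm
      simp at hgm
    have hA2 : (mods.any (fun m => (PySem.Dict.mk m).get? "category" == some "audience")) = true :=
      (any_iff mods hpre _).mpr ⟨m0, hm0, hc0⟩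
    simp [pvScanA, pvPriorityA, hA0, hA1, hA2]
    all_goals decide
  · -- pvMin mods = 3: "material" present, nothing higher-priority present
    obtain ⟨m0, hm0, hr0⟩ := hex (by omega)
    have hc0 : pvCat m0 = "material" := by
      rw [pvRk_cases] at hr0
      split_ifs at hr0 <;> first | omega | (apply Eq.symm; assumption)
    have hA0 : (mods.any (fun m => (PySem.Dict.mk m).get? "category" == some "location")) = false := by
      rw [Bool.eq_false_iff, Ne, any_iff mods hpre]
      rintro ⟨m, hm, hc⟩
      have hgm := hge m hm
      rw [pvRk_cases, hc] at hgm
      simp at hgm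
    have hA1 : (mods.any (fun m => (PySem.Dict.mk m).get? "category" == some "service_type")) = false := by
      rw [Bool.eq_false_iff, Ne, any_iff mods hpre]
      rintro ⟨m, hm, hc⟩
      have hgm := hge m hm
      rw [pvRk_cases, hc] at hgm
      simp at hgm
    have hA2 : (mods.any (fun m => (PySem.Dict.mk m).get? "category" == some "audience")) = false := by
      rw [Bool.eq_false_iff, Ne, any_iff mods hpre]
      rintro ⟨m, hm, hc⟩
      have hgm := hge m hm
      rw [pvRk_cases, hc] at hgm
      simp at hgm
    have hA3 : (mods.any (fun m => (PySem.Dict.mk m).get? "category" == some "material")) = true :=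
      (any_iff mods hpre _).mpr ⟨m0, hm0, hc0⟩
    simp [pvScanA, pvPriorityA, hA0, hA1, hA2, hA3]
    all_goals decide
  · -- pvMin mods = 4: "brand_entity" present, nothing higher-priority present
    obtain ⟨m0, hm0, hr0⟩ := hex (by omega)
    have hc0 : pvCat m0 = "brand_entity" := by
      rw [pvRk_cases] at hr0
      split_ifs at hr0 <;> first | omega | (apply Eq.symm; assumption)
    have hA0 : (mods.any (fun m => (PySem.Dict.mk m).get? "category" == some "location")) = false := by
      rw [Bool.eq_false_iff, Ne, any_iff mods hpre]
      rintro ⟨m, hm, hc⟩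
      have hgm := hge m hm
      rw [pvRk_cases, hc] at hgm
      simp at hgm
    have hA1 : (mods.any (fun m => (PySem.Dict.mk m).get? "category" == some "service_type")) = false := by
      rw [Bool.eq_false_iff, Ne, any_iff mods hpre]
      rintro ⟨m, hm, hc⟩
      have hgm := hge m hm
      rw [pvRk_cases, hc] at hgm
      simp at hgm
    have hA2 : (mods.any (fun m => (PySem.Dict.mk m).get? "category" == some "audience")) = false := by
      rw [Bool.eq_false_iff, Ne, any_iff mods hpre]
      rintro ⟨m, hm, hc⟩
      have hgm := hge m hm
      rw [pvRk_cases, hc] at hgm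
      simp at hgm
    have hA3 : (mods.any (fun m => (PySem.Dict.mk m).get? "category" == some "material")) = false := by
      rw [Bool.eq_false_iff, Ne, any_iff mods hpre]
      rintro ⟨m, hm, hc⟩
      have hgm := hge m hm
      rw [pvRk_cases, hc] at hgm
      simp at hgm
    have hA4 : (mods.any (fun m => (PySem.Dict.mk m).get? "category" == some "brand_entity")) = true :=
      (any_iff mods hpre _).mpr ⟨m0, hm0, hc0⟩
    simp [pvScanA, pvPriorityA, hA0, hA1, hA2, hA3, hA4]
    all_goals decide
  · -- pvMin mods = 5: "temporal" present, nothing higher-priority present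
    obtain ⟨m0, hm0, hr0⟩ := hex (by omega)
    have hc0 : pvCat m0 = "temporal" := by
      rw [pvRk_cases] at hr0
      split_ifs at hr0 <;> first | omega | (apply Eq.symm; assumption)
    have hA0 : (mods.any (fun m => (PySem.Dict.mk m).get? "category" == some "location")) = false := by
      rw [Bool.eq_false_iff, Ne, any_iff mods hpre]
      rintro ⟨m, hm, hc⟩
      have hgm := hge m hm
      rw [pvRk_cases, hc] at hgm
      simp at hgm
    have hA1 : (mods.any (fun m => (PySem.Dict.mk m).get? "category" == some "service_type")) = false := by
      rw [Bool.eq_false_iff, Ne, any_iff mods hpre]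
      rintro ⟨m, hm, hc⟩
      have hgm := hge m hm
      rw [pvRk_cases, hc] at hgm
      simp at hgm
    have hA2 : (mods.any (fun m => (PySem.Dict.mk m).get? "category" == some "audience")) = false := by
      rw [Bool.eq_false_iff, Ne, any_iff mods hpre]
      rintro ⟨m, hm, hc⟩
      have hgm := hge m hm
      rw [pvRk_cases, hc] at hgm
      simp at hgm
    have hA3 : (mods.any (fun m => (PySem.Dict.mk m).get? "category" == some "material")) = false := by
      rw [Bool.eq_false_iff, Ne, any_iff mods hpre]
      rintro ⟨m, hm, hc⟩
      have hgm := hge m hm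
      rw [pvRk_cases, hc] at hgm
      simp at hgm
    have hA4 : (mods.any (fun m => (PySem.Dict.mk m).get? "category" == some "brand_entity")) = false := by
      rw [Bool.eq_false_iff, Ne, any_iff mods hpre]
      rintro ⟨m, hm, hc⟩
      have hgm := hge m hm
      rw [pvRk_cases, hc] at hgm
      simp at hgm
    have hA5 : (mods.any (fun m => (PySem.Dict.mk m).get? "category" == some "temporal")) = true :=
      (any_iff mods hpre _).mpr ⟨m0, hm0, hc0⟩
    simp [pvScanA, pvPriorityA, hA0, hA1, hA2, hA3, hA4, hA5]
    all_goals decide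
  · -- pvMin mods = 6: "intent_qualifier" present, nothing higher-priority present
    obtain ⟨m0, hm0, hr0⟩ := hex (by omega)
    have hc0 : pvCat m0 = "intent_qualifier" := by
      rw [pvRk_cases] at hr0
      split_ifs at hr0 <;> first | omega | (apply Eq.symm; assumption)
    have hA0 : (mods.any (fun m => (PySem.Dict.mk m).get? "category" == some "location")) = false := by
      rw [Bool.eq_false_iff, Ne, any_iff mods hpre]
      rintro ⟨m, hm, hc⟩
      have hgm := hge m hm
      rw [pvRk_cases, hc] at hgm
      simp at hgm
    have hA1 : (mods.any (fun m => (PySem.Dict.mk m).get? "category" == some "service_type")) = false := by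
      rw [Bool.eq_false_iff, Ne, any_iff mods hpre]
      rintro ⟨m, hm, hc⟩
      have hgm := hge m hm
      rw [pvRk_cases, hc] at hgm
      simp at hgm
    have hA2 : (mods.any (fun m => (PySem.Dict.mk m).get? "category" == some "audience")) = false := by
      rw [Bool.eq_false_iff, Ne, any_iff mods hpre]
      rintro ⟨m, hm, hc⟩
      have hgm := hge m hm
      rw [pvRk_cases, hc] at hgm
      simp at hgm
    have hA3 : (mods.any (fun m => (PySem.Dict.mk m).get? "category" == some "material")) = false := by
      rw [Bool.eq_false_iff, Ne, any_iff mods hpre]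
      rintro ⟨m, hm, hc⟩
      have hgm := hge m hm
      rw [pvRk_cases, hc] at hgm
      simp at hgm
    have hA4 : (mods.any (fun m => (PySem.Dict.mk m).get? "category" == some "brand_entity")) = false := by
      rw [Bool.eq_false_iff, Ne, any_iff mods hpre]
      rintro ⟨m, hm, hc⟩
      have hgm := hge m hm
      rw [pvRk_cases, hc] at hgm
      simp at hgm
    have hA5 : (mods.any (fun m => (PySem.Dict.mk m).get? "category" == some "temporal")) = false := by
      rw [Bool.eq_false_iff, Ne, any_iff mods hpre]
      rintro ⟨m, hm, hc⟩
      have hgm := hge m hm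
      rw [pvRk_cases, hc] at hgm
      simp at hgm
    have hA6 : (mods.any (fun m => (PySem.Dict.mk m).get? "category" == some "intent_qualifier")) = true :=
      (any_iff mods hpre _).mpr ⟨m0, hm0, hc0⟩
    simp [pvScanA, pvPriorityA, hA0, hA1, hA2, hA3, hA4, hA5, hA6]
    all_goals decide
  · -- pvMin mods = 7: no known category present
    have hA0 : (mods.any (fun m => (PySem.Dict.mk m).get? "category" == some "location")) = false := by
      rw [Bool.eq_false_iff, Ne, any_iff mods hpre]
      rintro ⟨m, hm, hc⟩
      have hgm := hge m hm
      rw [pvRk_cases, hc] at hgm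
      simp at hgm
    have hA1 : (mods.any (fun m => (PySem.Dict.mk m).get? "category" == some "service_type")) = false := by
      rw [Bool.eq_false_iff, Ne, any_iff mods hpre]
      rintro ⟨m, hm, hc⟩
      have hgm := hge m hm
      rw [pvRk_cases, hc] at hgm
      simp at hgm
    have hA2 : (mods.any (fun m => (PySem.Dict.mk m).get? "category" == some "audience")) = false := by
      rw [Bool.eq_false_iff, Ne, any_iff mods hpre]
      rintro ⟨m, hm, hc⟩
      have hgm := hge m hm
      rw [pvRk_cases, hc] at hgm
      simp at hgm
    have hA3 : (mods.any (fun m => (PySem.Dict.mk m).get? "category" == some "material")) = false := by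
      rw [Bool.eq_false_iff, Ne, any_iff mods hpre]
      rintro ⟨m, hm, hc⟩
      have hgm := hge m hm
      rw [pvRk_cases, hc] at hgm
      simp at hgm
    have hA4 : (mods.any (fun m => (PySem.Dict.mk m).get? "category" == some "brand_entity")) = false := by
      rw [Bool.eq_false_iff, Ne, any_iff mods hpre]
      rintro ⟨m, hm, hc⟩
      have hgm := hge m hm
      rw [pvRk_cases, hc] at hgm
      simp at hgm
    have hA5 : (mods.any (fun m => (PySem.Dict.mk m).get? "category" == some "temporal")) = false := by
      rw [Bool.eq_false_iff, Ne, any_iff mods hpre]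
      rintro ⟨m, hm, hc⟩
      have hgm := hge m hm
      rw [pvRk_cases, hc] at hgm
      simp at hgm
    have hA6 : (mods.any (fun m => (PySem.Dict.mk m).get? "category" == some "intent_qualifier")) = false := by
      rw [Bool.eq_false_iff, Ne, any_iff mods hpre]
      rintro ⟨m, hm, hc⟩
      have hgm := hge m hm
      rw [pvRk_cases, hc] at hgm
      simp at hgm
    simp [pvScanA, pvPriorityA, hA0, hA1, hA2, hA3, hA4, hA5, hA6]

-- ===== VERDICT (by name: the statement is the Claim_ definition above) =====
theorem get_primary_modifier_category_spec : Claim_equal_get_primary_modifier_category := by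
  intro mods _ hpre
  unfold Spec_get_primary_modifier_category
  unfold get_primary_modifier_category get_primary_modifier_category_alt
  by_cases hnil : mods = []
  · simp [hnil]
  · rw [if_neg hnil, if_neg hnil]
    show pvScanA mods pvPriorityA =
      (if pvLoopB 7 mods < 7 then PySem.List.pyGetD pvPriorityB (pvLoopB 7 mods) "" else "unknown")
    rw [pvLoopB_eq mods 7 (by norm_num)]
    exact pvMain mods hpre
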